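-- pv_equiv track=rewrite | github.com/burning-calamity/extirpation | src/extirpation/bundled_online/quagmire_iv.py | quagmire_iv_encrypt
-- ===== SOURCE A (Python) =====
-- import string
--
-- ALPHABET = string.ascii_uppercase
--
-- def _clean(text: str) -> str:
--     return "".join(ch for ch in text.upper() if ch in ALPHABET)
--
-- def keyed_alphabet(keyword: str) -> str:
--     """Build a keyed alphabet by prepending unique letters from `keyword`."""
--     cleaned = _clean(keyword)
--     unique_key = "".join(dict.fromkeys(cleaned))
--     tail = "".join(ch for ch in ALPHABET if ch not in unique_key)
--     return unique_key + tail
--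
-- def quagmire_iv_encrypt(
--     plaintext: str,
--     plain_keyword: str,
--     cipher_keyword: str,
--     indicator_key: str,
-- ) -> str:
--     """Encrypt plaintext with a Quagmire IV-style polyalphabetic substitution.
--
--     This implementation uses:
--     - a keyed plaintext alphabet (`plain_keyword`)
--     - a keyed ciphertext alphabet (`cipher_keyword`)
--     - a repeating indicator key to choose the alphabet shift at each position
--     """
--     clean_plain = _clean(plaintext)
--     indicator = _clean(indicator_key)
--     if not indicator:
--         raise ValueError("indicator_key must contain at least one A-Z letter")
--
--     plain_alpha = keyed_alphabet(plain_keyword)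
--     cipher_alpha = keyed_alphabet(cipher_keyword)
--     out: list[str] = []
--
--     for i, ch in enumerate(clean_plain):
--         shift = ALPHABET.index(indicator[i % len(indicator)])
--         p_index = plain_alpha.index(ch)
--         out.append(cipher_alpha[(p_index + shift) % 26])
--
--     return "".join(out)
-- ===== SOURCE B (Python) =====
-- import string
--
-- ALPHABET = string.ascii_uppercase
--
--
-- def _clean(text: str) -> str:
--     return "".join(ch for ch in text.upper() if ch in ALPHABET)
--
--
-- def keyed_alphabet(keyword: str) -> str:
--     cleaned = _clean(keyword)
--     unique_key = "".join(dict.fromkeys(cleaned))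
--     tail = "".join(ch for ch in ALPHABET if ch not in unique_key)
--     return unique_key + tail
--
--
-- def quagmire_iv_encrypt(
--     plaintext: str,
--     plain_keyword: str,
--     cipher_keyword: str,
--     indicator_key: str,
-- ) -> str:
--     """Quagmire IV encryption, organised by indicator position: one full
--     substitution table is precomputed per indicator letter (a rotation of the
--     cipher alphabet zipped against the plain alphabet), then the cleaned
--     plaintext is processed in indicator-sized chunks zipped with the tables."""
--     clean_plain = _clean(plaintext)
--     indicator = _clean(indicator_key)
--     if not indicator:
--         raise ValueError("indicator_key must contain at least one A-Z letter")
--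
--     plain_alpha = keyed_alphabet(plain_keyword)
--     cipher_alpha = keyed_alphabet(cipher_keyword)
--
--     tables = []
--     for ch in indicator:
--         shift = ALPHABET.index(ch)
--         rotated = cipher_alpha[shift:] + cipher_alpha[:shift]
--         tables.append(dict(zip(plain_alpha, rotated)))
--
--     width = len(indicator)
--     pieces = []
--     for start in range(0, len(clean_plain), width):
--         chunk = clean_plain[start:start + width]
--         pieces.append("".join(t[c] for c, t in zip(chunk, tables)))
--     return "".join(pieces)
-- ===== Notes on version B (the rewrite author's own statement) =====
-- stated objective: alternative
-- what changed: B precomputes one full substitution dict per indicator position (the cipher alphabet rotated by that indicator letter's shift, zipped against the plain alphabet) and then encrypts the cleaned plaintext chunk-by-chunk zipped with those tables, instead of A's position-by-position loop that re-runs ALPHABET.index and plain_alpha.index for every character.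
import Mathlib
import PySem

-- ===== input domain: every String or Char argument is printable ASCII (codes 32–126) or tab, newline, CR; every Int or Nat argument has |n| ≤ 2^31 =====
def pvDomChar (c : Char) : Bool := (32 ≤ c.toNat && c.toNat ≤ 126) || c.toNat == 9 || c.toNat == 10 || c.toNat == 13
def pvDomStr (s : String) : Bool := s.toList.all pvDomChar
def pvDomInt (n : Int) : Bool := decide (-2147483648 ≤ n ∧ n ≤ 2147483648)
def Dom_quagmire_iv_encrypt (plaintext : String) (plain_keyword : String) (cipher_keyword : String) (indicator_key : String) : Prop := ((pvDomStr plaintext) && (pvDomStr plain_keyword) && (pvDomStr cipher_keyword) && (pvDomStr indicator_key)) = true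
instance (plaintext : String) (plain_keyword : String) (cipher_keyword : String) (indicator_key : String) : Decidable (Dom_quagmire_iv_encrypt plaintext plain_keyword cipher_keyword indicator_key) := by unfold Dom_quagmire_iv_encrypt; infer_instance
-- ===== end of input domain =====

-- B groups the work per indicator position: one substitution table per indicator letter
-- (a rotation of the cipher alphabet zipped against the plain alphabet), then the cleaned
-- plaintext is encrypted chunk-by-chunk zipped with those tables ("alternative" objective).

-- ===== PORT A =====
-- ALPHABET = string.ascii_uppercase
def pvALPHA : List Char := "ABCDEFGHIJKLMNOPQRSTUVWXYZ".toList

-- _clean(text): keep the A-Z characters of text.upper()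
def pvClean (text : String) : List Char :=
  (PySem.Str.upper text).toList.filter (fun ch => pvALPHA.contains ch)

-- keyed_alphabet(keyword) as a list of characters
def pvKeyed (keyword : String) : List Char :=
  let cleaned := pvClean keyword
  let unique_key := PySem.List.dedup cleaned
  let tail := pvALPHA.filter (fun ch => !unique_key.contains ch)
  unique_key ++ tail

def quagmire_iv_encrypt (plaintext : String) (plain_keyword : String) (cipher_keyword : String) (indicator_key : String) : String :=
  let clean_plain := pvClean plaintext
  let indicator := pvClean indicator_key
  if indicator = [] then ""   -- Python raises ValueError here: excluded by Pre_
  else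
    let plain_alpha := pvKeyed plain_keyword
    let cipher_alpha := pvKeyed cipher_keyword
    -- for i, ch in enumerate(clean_plain): out.append(cipher_alpha[(p_index + shift) % 26])
    -- the .getD 0 defaults of the two .index calls and of the final indexing are never
    -- used: indicator/clean characters are always found (proved in the lemmas below)
    let out : List Char := (PySem.List.enumerate clean_plain).foldl (fun acc ic =>
      let shift := (PySem.List.index? pvALPHA
        (PySem.List.pyGetD indicator (PySem.Int.mod ic.1 indicator.length) 'A')).getD 0
      let p_index := (PySem.List.index? plain_alpha ic.2).getD 0
      acc ++ [PySem.List.pyGetD cipher_alpha (((p_index + shift) % 26 : Nat) : Int) 'A']) []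
    String.ofList out

-- ===== PORT B =====
-- one substitution table: dict(zip(plain_alpha, cipher_alpha[shift:] + cipher_alpha[:shift]))
def pvTable (cipher_alpha : List Char) (plain_alpha : List Char) (ch : Char) : PySem.Dict Char Char :=
  let shift := (PySem.List.index? pvALPHA ch).getD 0
  let rotated := cipher_alpha.drop shift ++ cipher_alpha.take shift
  PySem.Dict.ofList (plain_alpha.zip rotated)

def quagmire_iv_encrypt_alt (plaintext : String) (plain_keyword : String) (cipher_keyword : String) (indicator_key : String) : String :=
  let clean_plain := pvClean plaintext
  let indicator := pvClean indicator_key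
  if indicator = [] then ""   -- Python raises ValueError here: excluded by Pre_
  else
    let plain_alpha := pvKeyed plain_keyword
    let cipher_alpha := pvKeyed cipher_keyword
    let tables := indicator.map (pvTable cipher_alpha plain_alpha)
    -- for start in range(0, len(clean_plain), width): pieces.append("".join(t[c] for c, t in zip(chunk, tables)))
    -- the .getD 'A' default of the dict lookup is never used (plain_alpha holds all 26 letters)
    let pieces : List (List Char) := (PySem.List.pyRange 0 clean_plain.length indicator.length).foldl
      (fun acc start =>
        let chunk := PySem.List.slice clean_plain (some start) (some (start + indicator.length))
        acc ++ [(chunk.zip tables).map (fun ct => ct.2.getD ct.1 'A')]) []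
    String.ofList pieces.flatten

-- ===== PRECONDITION & SPEC =====
-- Pre_ excludes exactly the inputs whose indicator_key has no A-Z letter: there the
-- Python A (and B alike) raises ValueError instead of returning.
def Pre_quagmire_iv_encrypt (plaintext : String) (plain_keyword : String) (cipher_keyword : String) (indicator_key : String) : Prop :=
  pvClean indicator_key ≠ []
instance (plaintext : String) (plain_keyword : String) (cipher_keyword : String) (indicator_key : String) : Decidable (Pre_quagmire_iv_encrypt plaintext plain_keyword cipher_keyword indicator_key) := by unfold Pre_quagmire_iv_encrypt; infer_instance

def pvWitness_quagmire_iv_encrypt : String × String × String × String :=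
  ("Hello, World!", "Paulbrandt", "Brubalelsk", "Countryman")

def Spec_quagmire_iv_encrypt (plaintext : String) (plain_keyword : String) (cipher_keyword : String) (indicator_key : String) (out : String) : Prop := out = quagmire_iv_encrypt_alt plaintext plain_keyword cipher_keyword indicator_key
instance (plaintext : String) (plain_keyword : String) (cipher_keyword : String) (indicator_key : String) (out : String) : Decidable (Spec_quagmire_iv_encrypt plaintext plain_keyword cipher_keyword indicator_key out) := by unfold Spec_quagmire_iv_encrypt; infer_instance

-- ===== CLAIM (what is proved, stated in full; the proofs are below) =====
def Claim_equal_quagmire_iv_encrypt : Prop := ∀ (plaintext : String) (plain_keyword : String) (cipher_keyword : String) (indicator_key : String), Dom_quagmire_iv_encrypt plaintext plain_keyword cipher_keyword indicator_key → Pre_quagmire_iv_encrypt plaintext plain_keyword cipher_keyword indicator_key → Spec_quagmire_iv_encrypt plaintext plain_keyword cipher_keyword indicator_key (quagmire_iv_encrypt plaintext plain_keyword cipher_keyword indicator_key)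

-- ===== LEMMAS AND PROOFS =====

theorem pv_alpha_nodup : pvALPHA.Nodup := by decide
theorem pv_alpha_len : pvALPHA.length = 26 := by decide

theorem pv_mem_clean (s : String) {c : Char} (h : c ∈ pvClean s) : c ∈ pvALPHA := by
  unfold pvClean at h
  simp only [List.mem_filter, List.contains_iff_mem] at h
  exact h.2

theorem pv_keyed_perm (kw : String) : (pvKeyed kw).Perm pvALPHA := by
  unfold pvKeyed
  have hnodup : (PySem.List.dedup (pvClean kw) ++
      pvALPHA.filter (fun ch => !(PySem.List.dedup (pvClean kw)).contains ch)).Nodup := by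
    refine List.Nodup.append (PySem.List.nodup_dedup _) (pv_alpha_nodup.filter _) ?_
    intro x hx hx'
    have h1 := List.of_mem_filter hx'
    simp at h1
    exact h1 ((PySem.List.mem_dedup _ _).mp hx)
  rw [List.perm_ext_iff_of_nodup hnodup pv_alpha_nodup]
  intro a
  constructor
  · intro ha
    rcases List.mem_append.mp ha with h | h
    · exact pv_mem_clean kw ((PySem.List.mem_dedup _ _).mp h)
    · exact List.mem_of_mem_filter h
  · intro ha
    by_cases hmem : a ∈ PySem.List.dedup (pvClean kw)
    · exact List.mem_append.mpr (Or.inl hmem)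
    · refine List.mem_append.mpr (Or.inr (List.mem_filter.mpr ⟨ha, ?_⟩))
      simpa using hmem

theorem pv_keyed_len (kw : String) : (pvKeyed kw).length = 26 :=
  ((pv_keyed_perm kw).length_eq).trans pv_alpha_len

theorem pv_keyed_nodup (kw : String) : (pvKeyed kw).Nodup :=
  ((pv_keyed_perm kw).nodup_iff).mpr pv_alpha_nodup

theorem pv_mem_keyed (kw : String) {c : Char} (h : c ∈ pvALPHA) : c ∈ pvKeyed kw :=
  ((pv_keyed_perm kw).mem_iff).mpr h

-- v ∈ xs gives a found index with its bound and value
theorem pv_index_spec {xs : List Char} {v : Char} (h : v ∈ xs) :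
    ∃ k, PySem.List.index? xs v = some k ∧ ∃ (hk : k < xs.length), xs[k] = v := by
  rcases Option.isSome_iff_exists.mp ((PySem.List.index?_isSome_iff xs v).mpr h) with ⟨k, hk⟩
  rcases PySem.List.getElem_of_index?_eq_some hk with ⟨hlt, hval, -⟩
  exact ⟨k, hk, hlt, hval⟩

-- the rotated cipher alphabet indexes as modular indexing of the original
theorem pv_rot_getElem? (ca : List Char) (hca : ca.length = 26) (s p : Nat)
    (hs : s < 26) (hp : p < 26) :
    (ca.drop s ++ ca.take s)[p]? = ca[(p + s) % 26]? := by
  by_cases h : p < 26 - s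
  · rw [List.getElem?_append_left (by simp [hca]; omega)]
    rw [List.getElem?_drop]
    congr 1
    omega
  · rw [List.getElem?_append_right (by simp [hca]; omega)]
    have hlen : (ca.drop s).length = 26 - s := by simp [hca]
    rw [hlen, List.getElem?_take_of_lt (by omega : p - (26 - s) < s)]
    congr 1
    omega

-- dict(zip(ks, vs)) looked up at the first index of c in ks
theorem pv_zip_get? : ∀ (ks vs : List Char), vs.length = ks.length →
    ∀ {c : Char} {p : Nat}, PySem.List.index? ks c = some p →
    (PySem.Dict.mk (ks.zip vs)).get? c = vs[p]? := by
  intro ks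
  induction ks with
  | nil => intro vs _ c p hp; simp [PySem.List.index?] at hp
  | cons k ks ih =>
    intro vs hlen c p hp
    cases vs with
    | nil => simp at hlen
    | cons v vs =>
      simp only [List.zip_cons_cons, PySem.Dict.get?_mk_cons]
      by_cases hkc : k = c
      · subst hkc
        rw [PySem.List.index?_cons_self] at hp
        cases hp
        simp
      · rw [PySem.List.index?_cons_of_ne ks hkc] at hp
        rcases Option.map_eq_some_iff.mp hp with ⟨p', hp', rfl⟩
        simp only [beq_iff_eq, if_neg hkc]
        rw [ih vs (by simpa using hlen) hp']
        simp

-- with nodup keys, dict(zip(ks, vs)) has exactly those items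
theorem pv_ofList_zip (ks vs : List Char) (hk : ks.Nodup) (hlen : vs.length = ks.length) :
    PySem.Dict.ofList (ks.zip vs) = PySem.Dict.mk (ks.zip vs) := by
  have h := PySem.Dict.items_foldl_insert_fresh (ks.zip vs) Prod.fst Prod.snd
    (PySem.Dict.empty) (by intro a _; rfl)
    (by rw [List.map_fst_zip (by omega : ks.length ≤ vs.length)]; exact hk)
  apply PySem.Dict.ext
  simpa [PySem.Dict.ofList, PySem.Dict.update, PySem.Dict.empty] using h

-- the pointwise fact: B's table lookup computes A's per-character formula
theorem pv_pointwise (pk ck : String) (ind : List Char) {j : Nat} (hj : j < ind.length)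
    (hind : ∀ c ∈ ind, c ∈ pvALPHA) {c : Char} (hc : c ∈ pvALPHA) (i : Int)
    (hmod : PySem.Int.mod i ind.length = (j : Int)) :
    ((pvTable (pvKeyed ck) (pvKeyed pk) ind[j]).getD c 'A') =
      PySem.List.pyGetD (pvKeyed ck)
        ((((PySem.List.index? (pvKeyed pk) c).getD 0 +
           (PySem.List.index? pvALPHA
             (PySem.List.pyGetD ind (PySem.Int.mod i ind.length) 'A')).getD 0) % 26 : Nat) : Int) 'A' := by
  have hindj : PySem.List.pyGetD ind (PySem.Int.mod i ind.length) 'A' = ind[j] := by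
    rw [hmod]
    rw [PySem.List.pyGetD_natCast]
    exact List.getD_eq_getElem ind 'A' hj
  rw [hindj]
  rcases pv_index_spec (hind _ (List.getElem_mem hj)) with ⟨sh, hsh, hshlt, -⟩
  rcases pv_index_spec (pv_mem_keyed pk hc) with ⟨p, hp, hplt, -⟩
  rw [pv_alpha_len] at hshlt
  rw [pv_keyed_len] at hplt
  unfold pvTable
  rw [hsh, hp]
  simp only [Option.getD_some]
  have hrot : ((pvKeyed ck).drop sh ++ (pvKeyed ck).take sh).length = 26 := by
    simp [pv_keyed_len]
    omega
  have hget : (PySem.Dict.mk ((pvKeyed pk).zip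
      ((pvKeyed ck).drop sh ++ (pvKeyed ck).take sh))).get? c =
      ((pvKeyed ck).drop sh ++ (pvKeyed ck).take sh)[p]? := by
    exact pv_zip_get? _ _ (by rw [hrot, pv_keyed_len]) hp
  rw [pv_ofList_zip _ _ (pv_keyed_nodup pk) (by rw [hrot, pv_keyed_len])]
  rw [pv_rot_getElem? _ (pv_keyed_len ck) sh p hshlt hplt] at hget
  have hlt26 : (p + sh) % 26 < (pvKeyed ck).length := by
    rw [pv_keyed_len]; omega
  have := List.getElem?_eq_getElem hlt26
  rw [this] at hget
  rw [PySem.Dict.getD_of_get?_eq_some _ _ hget]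
  rw [PySem.List.pyGetD_natCast]
  exact (List.getD_eq_getElem _ 'A' hlt26).symm

-- abbreviation for A's per-character map (proof-only)
def pvA (pk ck : String) (ind : List Char) (i : Int) (c : Char) : Char :=
  PySem.List.pyGetD (pvKeyed ck)
    ((((PySem.List.index? (pvKeyed pk) c).getD 0 +
       (PySem.List.index? pvALPHA
         (PySem.List.pyGetD ind (PySem.Int.mod i ind.length) 'A')).getD 0) % 26 : Nat) : Int) 'A'

-- one chunk zipped against the table suffix equals A's map on that chunk
theorem pv_chunk (pk ck : String) (ind : List Char) (hind : ∀ c ∈ ind, c ∈ pvALPHA)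
    (q : Nat) :
    ∀ (ys : List Char) (j : Nat), j + ys.length ≤ ind.length →
    (∀ c ∈ ys, c ∈ pvALPHA) →
    (ys.zip ((ind.map (pvTable (pvKeyed ck) (pvKeyed pk))).drop j)).map
        (fun ct => ct.2.getD ct.1 'A')
      = (PySem.List.enumerate ys ((ind.length * q + j : Nat) : Int)).map
          (fun ic => pvA pk ck ind ic.1 ic.2) := by
  intro ys
  induction ys with
  | nil => intro j _ _; simp [PySem.List.enumerate]
  | cons c ys ih =>
    intro j hlen hmem
    have hj : j < ind.length := by simp at hlen; omega
    have hjt : j < (ind.map (pvTable (pvKeyed ck) (pvKeyed pk))).length := by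
      simpa using hj
    rw [List.drop_eq_getElem_cons hjt]
    simp only [List.zip_cons_cons, List.map_cons, PySem.List.enumerate_cons]
    rw [List.cons_eq_cons]
    refine ⟨?_, ?_⟩
    · rw [List.getElem_map]
      have hmod : PySem.Int.mod ((ind.length * q + j : Nat) : Int) ind.length = (j : Int) := by
        rw [PySem.Int.mod_natCast]
        rw [Nat.mul_add_mod, Nat.mod_eq_of_lt hj]
      rw [pv_pointwise pk ck ind hj hind (hmem c (List.mem_cons_self))
        ((ind.length * q + j : Nat) : Int) hmod]
      unfold pvA
      rfl
    · have hcast : ((ind.length * q + j : Nat) : Int) + 1 = ((ind.length * q + (j + 1) : Nat) : Int) := by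
        push_cast
        ring
      rw [hcast]
      exact ih (j + 1) (by simp at hlen; omega) (fun c hc => hmem c (List.mem_cons_of_mem _ hc))

-- B's chunked pieces flatten to A's map over the enumerated text
theorem pv_chunks (pk ck : String) (ind : List Char) (hind : ∀ c ∈ ind, c ∈ pvALPHA) :
    ∀ (m : Nat) (xs : List Char) (q : Nat), xs.length ≤ m * ind.length →
    (∀ c ∈ xs, c ∈ pvALPHA) →
    ((List.range m).map (fun k =>
      (((xs.drop (ind.length * k)).take ind.length).zip
          (ind.map (pvTable (pvKeyed ck) (pvKeyed pk)))).map
        (fun ct => ct.2.getD ct.1 'A'))).flatten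
    = (PySem.List.enumerate xs ((ind.length * q : Nat) : Int)).map
        (fun ic => pvA pk ck ind ic.1 ic.2) := by
  intro m
  induction m with
  | zero =>
    intro xs q hlen _
    have : xs = [] := List.eq_nil_of_length_eq_zero (by omega)
    subst this
    simp [PySem.List.enumerate]
  | succ m ih =>
    intro xs q hlen hmem
    rw [List.range_succ_eq_map]
    simp only [List.map_cons, List.flatten_cons, List.map_map]
    have hsplit := (List.take_append_drop ind.length xs).symm
    conv_rhs => rw [hsplit]
    rw [PySem.List.enumerate_append, List.map_append]
    congr 1
    · have := pv_chunk pk ck ind hind q (xs.take ind.length) 0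
        (by simp) (fun c hc => hmem c (List.mem_of_mem_take hc))
      simpa using this
    · by_cases hsmall : xs.length ≤ ind.length
      · have hdrop : xs.drop ind.length = [] := by
          rw [List.drop_eq_nil_iff]
          omega
        rw [hdrop]
        simp only [PySem.List.enumerate, List.map_nil]
        simp
        intro a ha
        left
        right
        have hexp : ind.length * (a + 1) = ind.length * a + ind.length := by ring
        omega
      · have hpieces : ∀ k, xs.drop (ind.length * (k + 1)) = (xs.drop ind.length).drop (ind.length * k) := by
          intro k
          rw [List.drop_drop]
          congr 1
          ring
        have hlen2 : (xs.take ind.length).length = ind.length := by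
          simp
          omega
        have hstart : ((ind.length * q : Nat) : Int) + ((xs.take ind.length).length : Int)
            = ((ind.length * (q + 1) : Nat) : Int) := by
          rw [hlen2]
          push_cast
          ring
        rw [hstart]
        have := ih (xs.drop ind.length) (q + 1)
          (by simp
              have hexp : (m + 1) * ind.length = m * ind.length + ind.length := by ring
              omega)
          (fun c hc => hmem c (List.mem_of_mem_drop hc))
        rw [← this]
        congr 1
        refine List.map_congr_left (fun k _ => ?_)
        simp only [Function.comp]
        rw [hpieces k]

-- range(0, n, L) enumerates the chunk starts L*k
theorem pv_pyRange_step (n L : Nat) (hL : 0 < L) :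
    PySem.List.pyRange 0 (n : Int) (L : Int) =
      (List.range ((n + L - 1) / L)).map (fun k => ((L * k : Nat) : Int)) := by
  unfold PySem.List.pyRange
  rw [if_neg (by exact_mod_cast hL.ne')]
  rw [if_pos (by exact_mod_cast hL)]
  by_cases hn : (0 : Int) < (n : Int)
  · rw [if_pos hn]
    have hcount : (((n : Int) - 0 + L - 1) / L).toNat = (n + L - 1) / L := by
      have h1 : ((n : Int) - 0 + L - 1) = ((n + L - 1 : Nat) : Int) := by omega
      rw [h1, ← Int.natCast_ediv, Int.toNat_natCast]
    rw [hcount]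
    refine List.map_congr_left (fun k _ => ?_)
    push_cast
    ring
  · rw [if_neg hn]
    have hn0 : n = 0 := by omega
    subst hn0
    rw [Nat.div_eq_of_lt (by omega)]
    simp

theorem quagmire_iv_encrypt_spec : Claim_equal_quagmire_iv_encrypt := by
  intro pt pk ck ik hdom hpre
  unfold Pre_quagmire_iv_encrypt at hpre
  unfold Spec_quagmire_iv_encrypt
  unfold quagmire_iv_encrypt quagmire_iv_encrypt_alt
  simp only []
  rw [if_neg hpre, if_neg hpre]
  refine congrArg String.ofList ?_
  simp only [PySem.List.foldl_append_singleton_eq_map, List.nil_append]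
  set n := (pvClean pt).length with hn
  set L := (pvClean ik).length with hL
  have hLpos : 0 < L := List.length_pos_of_ne_nil hpre
  rw [pv_pyRange_step n L hLpos, List.map_map]
  set m := (n + L - 1) / L with hm
  have hmL : n ≤ m * L := by
    have h1 : m * L + (n + L - 1) % L = n + L - 1 := by
      rw [hm, Nat.mul_comm]
      exact Nat.div_add_mod (n + L - 1) L
    have h2 := Nat.mod_lt (n + L - 1) hLpos
    omega
  have hslice : (List.range m).map
      ((fun start => ((PySem.List.slice (pvClean pt) (some start) (some (start + (L : Int)))).zip
        ((pvClean ik).map (pvTable (pvKeyed ck) (pvKeyed pk)))).map (fun ct => ct.2.getD ct.1 'A')) ∘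
        (fun k => ((L * k : Nat) : Int)))
      = (List.range m).map (fun k =>
        ((((pvClean pt).drop (L * k)).take L).zip
          ((pvClean ik).map (pvTable (pvKeyed ck) (pvKeyed pk)))).map (fun ct => ct.2.getD ct.1 'A')) := by
    refine List.map_congr_left (fun k _ => ?_)
    simp only [Function.comp]
    rw [PySem.List.slice_natCast_add]
  rw [hslice]
  have hchunks := pv_chunks pk ck (pvClean ik) (fun c hc => pv_mem_clean ik hc)
    m (pvClean pt) 0 (by rw [← hL]; exact hmL) (fun c hc => pv_mem_clean pt hc)
  simp only [Nat.mul_zero, Nat.cast_zero] at hchunks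
  rw [← hL] at hchunks
  rw [hchunks]
  simp only [pvA]
  rw [← hL]
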